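-- pv_equiv track=rewrite | github.com/Jeffrey-Sardina/TWIG-I | src/twigi/build/lib/twigi/utils.py | get_subj_obj_cofreqs
-- ===== SOURCE A (Python) =====
-- def get_subj_obj_cofreqs(triples):
--     '''
--     get_subj_obj_cofreqs() calculates the co-frequencies of every node-node pair in the given triples, irrespective of the predicate that connects them.
--
--     The arguments it acepts are:
--         - triples (list<tuple<int, int int>>): a list of all triples (using numeric IDs for their elements). In each row of this list, the integers represent, in order, the IDs of the subject, predicate, and object of a triple.
--
--     The values returned are:
--         - sorted_subj_obj_cofreqs (dict of tuple<int,int> -> int): A dict that maps a subject ID and an object ID to the number of times that (s, *, o) is observed in the given triples.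
--
--     NOTE: dicts are sorted by key as a standardisation and reproducibility measure.
--     '''
--     subj_obj_cofreqs = {}
--     for s, _, o in triples:
--         if not (s, o) in subj_obj_cofreqs:
--             subj_obj_cofreqs[(s, o)] = 0
--         subj_obj_cofreqs[(s, o)] += 1
--     sorted_subj_obj_cofreqs = dict(sorted(subj_obj_cofreqs.items()))
--     return sorted_subj_obj_cofreqs
-- ===== SOURCE B (Python) =====
-- def get_subj_obj_cofreqs(triples):
--     '''Sort the (s, o) pairs first, then count runs of equal pairs in one
--     pass, inserting each finished run into the dict; because the pairs are
--     sorted, the dict is built directly in sorted-key order.'''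
--     pairs = sorted([(s, o) for s, _, o in triples])
--     result = {}
--     cur = None
--     count = 0
--     for p in pairs:
--         if p == cur:
--             count += 1
--         else:
--             if cur is not None:
--                 result[cur] = count
--             cur = p
--             count = 1
--     if cur is not None:
--         result[cur] = count
--     return result
-- ===== Notes on version B (the rewrite author's own statement) =====
-- stated objective: alternative
-- what changed: A counts pairs in a hash dict and sorts the items afterwards; B sorts the raw (s,o) pair list first and then builds the dict in one linear grouping pass over runs of equal pairs, so no trailing sorted() call is needed.
import Mathlib
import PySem

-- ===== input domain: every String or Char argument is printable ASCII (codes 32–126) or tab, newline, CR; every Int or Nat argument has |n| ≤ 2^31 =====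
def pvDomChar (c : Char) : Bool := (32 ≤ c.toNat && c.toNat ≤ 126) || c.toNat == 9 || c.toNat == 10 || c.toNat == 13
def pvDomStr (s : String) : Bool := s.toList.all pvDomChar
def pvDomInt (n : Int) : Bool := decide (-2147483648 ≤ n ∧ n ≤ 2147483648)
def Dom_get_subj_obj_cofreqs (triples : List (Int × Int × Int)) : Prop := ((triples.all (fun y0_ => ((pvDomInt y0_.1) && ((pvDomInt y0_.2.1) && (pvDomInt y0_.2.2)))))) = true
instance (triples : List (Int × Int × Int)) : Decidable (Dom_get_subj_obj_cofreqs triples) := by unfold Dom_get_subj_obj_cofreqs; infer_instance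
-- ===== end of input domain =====

-- B sorts the extracted (s,o) pairs and builds the dict by grouping runs in one pass,
-- instead of A's hash-count-then-sort; proved to return the same sorted association list.


-- ===== PORT A =====
-- dict key (s, o) : Int × Int; the returned dict {(s,o): c} is rendered as the triple (s, o, c).
-- 'd[(s,o)] += 1' runs after the key is guaranteed present, so 'getD _ 0' reads the exact stored value.
-- Python's sorted(d.items()) compares ((s,o),c) tuples lexicographically; the keys are distinct,
-- so sorting by the key components (s, then o) yields the identical order (sorted2 is stable).
def get_subj_obj_cofreqs (triples : List (Int × Int × Int)) : List (Int × Int × Int) :=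
  let subj_obj_cofreqs : PySem.Dict (Int × Int) Int :=
    triples.foldl (fun d t =>
      match t with
      | (s, _, o) =>
        let d := if d.contains (s, o) = false then d.insert (s, o) 0 else d
        d.insert (s, o) (d.getD (s, o) 0 + 1)) PySem.Dict.empty
  (PySem.List.sorted2 subj_obj_cofreqs.items (fun q => q.1.1) (fun q => q.1.2)).map
    (fun q => (q.1.1, q.1.2, q.2))

-- ===== PORT B =====
-- one grouping step of B's for-loop: state (result, cur, count)
def pvAltStep (st : List ((Int × Int) × Int) × Option (Int × Int) × Int) (p : Int × Int) :
    List ((Int × Int) × Int) × Option (Int × Int) × Int :=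
  match st with
  | (res, cur, cnt) =>
    if some p = cur then (res, cur, cnt + 1)
    else ((match cur with | none => res | some c => res ++ [(c, cnt)]), some p, 1)

def get_subj_obj_cofreqs_alt (triples : List (Int × Int × Int)) : List (Int × Int × Int) :=
  let pairs := PySem.List.sorted2 (triples.map (fun t => (t.1, t.2.2))) (fun p => p.1) (fun p => p.2)
  let st := pairs.foldl pvAltStep ([], none, 0)
  let result := match st.2.1 with | none => st.1 | some c => st.1 ++ [(c, st.2.2)]
  result.map (fun q => (q.1.1, q.1.2, q.2))

-- ===== PRECONDITION & SPEC =====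
def Spec_get_subj_obj_cofreqs (triples : List (Int × Int × Int)) (out : List (Int × Int × Int)) : Prop := out = get_subj_obj_cofreqs_alt triples
instance (triples : List (Int × Int × Int)) (out : List (Int × Int × Int)) : Decidable (Spec_get_subj_obj_cofreqs triples out) := by unfold Spec_get_subj_obj_cofreqs; infer_instance

-- ===== CLAIM (what is proved, stated in full; the proofs are below) =====
def Claim_equal_get_subj_obj_cofreqs : Prop := ∀ (triples : List (Int × Int × Int)), Dom_get_subj_obj_cofreqs triples → Spec_get_subj_obj_cofreqs triples (get_subj_obj_cofreqs triples)

-- ===== LEMMAS AND PROOFS =====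

def pvLexLe (a b : Int × Int) : Prop := a.1 < b.1 ∨ (a.1 = b.1 ∧ a.2 ≤ b.2)
def pvLexLt (a b : Int × Int) : Prop := a.1 < b.1 ∨ (a.1 = b.1 ∧ a.2 < b.2)

def pvGroupRuns (cur : Int × Int) (cnt : Int) : List (Int × Int) → List ((Int × Int) × Int)
  | [] => [(cur, cnt)]
  | p :: rest => if p = cur then pvGroupRuns cur (cnt + 1) rest
                 else (cur, cnt) :: pvGroupRuns p 1 rest

theorem pv_foldl_altStep (rest : List (Int × Int)) (res : List ((Int × Int) × Int))
    (cur : Int × Int) (cnt : Int) :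
    (let st := rest.foldl pvAltStep (res, some cur, cnt)
     match st.2.1 with | none => st.1 | some c => st.1 ++ [(c, st.2.2)])
      = res ++ pvGroupRuns cur cnt rest := by
  induction rest generalizing res cur cnt with
  | nil => simp [pvGroupRuns]
  | cons p rest ih =>
    by_cases h : p = cur
    · subst h
      simp only [List.foldl_cons, pvAltStep, if_pos rfl, pvGroupRuns]
      exact ih res p (cnt + 1)
    · have hne : ¬ (some p = some cur) := by simpa using h
      simp only [List.foldl_cons, pvAltStep, if_neg hne, pvGroupRuns, if_neg h]
      rw [ih (res ++ [(cur, cnt)]) p 1]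
      simp

theorem pv_mem_groupRuns (rest : List (Int × Int)) (cur : Int × Int) (cnt : Int)
    (q : (Int × Int) × Int) (hq : q ∈ pvGroupRuns cur cnt rest) :
    q.1 = cur ∨ q.1 ∈ rest := by
  induction rest generalizing cur cnt with
  | nil => simp [pvGroupRuns] at hq; simp [hq]
  | cons p rest ih =>
    by_cases h : p = cur
    · subst h
      simp only [pvGroupRuns, if_pos rfl] at hq
      rcases ih p (cnt + 1) hq with h' | h' <;> simp [h']
    · simp only [pvGroupRuns, if_neg h, List.mem_cons] at hq
      rcases hq with h' | h'
      · simp [h']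
      · rcases ih p 1 h' with h'' | h'' <;> simp [h'']


theorem pv_lexLt_of_le_ne {a b : Int × Int} (h : pvLexLe a b) (hne : a ≠ b) : pvLexLt a b := by
  rcases a with ⟨a1, a2⟩; rcases b with ⟨b1, b2⟩
  simp only [pvLexLe, pvLexLt, ne_eq, Prod.mk.injEq, not_and] at *
  omega

theorem pv_lexLt_trans_le {a b c : Int × Int} (h1 : pvLexLt a b) (h2 : pvLexLe b c) : pvLexLt a c := by
  simp only [pvLexLe, pvLexLt] at *; omega

theorem pv_groupRuns_pairwise (rest : List (Int × Int)) (cur : Int × Int) (cnt : Int)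
    (h : (cur :: rest).Pairwise pvLexLe) :
    (pvGroupRuns cur cnt rest).Pairwise (fun a b => pvLexLt a.1 b.1) := by
  induction rest generalizing cur cnt with
  | nil => exact List.pairwise_singleton _ _
  | cons p rest ih =>
    rcases List.pairwise_cons.mp h with ⟨hcur, hrest⟩
    rcases List.pairwise_cons.mp hrest with ⟨hp, _⟩
    by_cases hpc : p = cur
    · subst hpc
      show (pvGroupRuns p cnt (p :: rest)).Pairwise _
      simp only [pvGroupRuns, if_pos rfl]
      exact ih p (cnt + 1) hrest
    · have hlt : pvLexLt cur p := pv_lexLt_of_le_ne (hcur p (by simp)) (Ne.symm hpc)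
      simp only [pvGroupRuns, if_neg hpc]
      refine List.pairwise_cons.mpr ⟨?_, ih p 1 hrest⟩
      intro q hq
      rcases pv_mem_groupRuns rest p 1 q hq with h' | h'
      · rw [h']; exact hlt
      · exact pv_lexLt_trans_le hlt (hp q.1 h')

theorem pv_lexLt_irrefl (a : Int × Int) : ¬ pvLexLt a a := by
  simp [pvLexLt]

theorem pv_mem_groupRuns_iff (rest : List (Int × Int)) (cur : Int × Int) (cnt : Int)
    (h : (cur :: rest).Pairwise pvLexLe) (q : (Int × Int) × Int) :
    q ∈ pvGroupRuns cur cnt rest ↔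
      (q.1 = cur ∧ q.2 = cnt + (rest.count cur : Int)) ∨
      (q.1 ≠ cur ∧ q.1 ∈ rest ∧ q.2 = (rest.count q.1 : Int)) := by
  induction rest generalizing cur cnt with
  | nil =>
    show q ∈ [(cur, cnt)] ↔ _
    simp [Prod.ext_iff]
  | cons p rest ih =>
    rcases List.pairwise_cons.mp h with ⟨hcur, hrest⟩
    rcases List.pairwise_cons.mp hrest with ⟨hp, _⟩
    by_cases hpc : p = cur
    · subst hpc
      rw [show pvGroupRuns p cnt (p :: rest) = pvGroupRuns p (cnt + 1) rest from by
        simp [pvGroupRuns]]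
      rw [ih p (cnt + 1) hrest]
      constructor
      · rintro (⟨h1, h2⟩ | ⟨h1, h2, h3⟩)
        · exact Or.inl ⟨h1, by rw [h2, List.count_cons_self]; push_cast; ring⟩
        · exact Or.inr ⟨h1, by simp [h2], by simp [h3, List.count_cons, Ne.symm h1]⟩
      · rintro (⟨h1, h2⟩ | ⟨h1, h2, h3⟩)
        · exact Or.inl ⟨h1, by rw [h2, List.count_cons_self]; push_cast; ring⟩
        · refine Or.inr ⟨h1, ?_, by simp [h3, List.count_cons, Ne.symm h1]⟩
          rcases List.mem_cons.mp h2 with h' | h'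
          · exact absurd h' h1
          · exact h'
    · have hlt : pvLexLt cur p := pv_lexLt_of_le_ne (hcur p (by simp)) (Ne.symm hpc)
      have hcurnot : cur ∉ rest := by
        intro hmem
        exact pv_lexLt_irrefl cur (pv_lexLt_trans_le hlt (hp cur hmem))
      have hcount0 : (p :: rest).count cur = 0 := by
        rw [List.count_eq_zero]
        simp only [List.mem_cons, not_or]
        exact ⟨fun h' => hpc (h'.symm ▸ rfl), hcurnot⟩
      rw [show pvGroupRuns cur cnt (p :: rest) = (cur, cnt) :: pvGroupRuns p 1 rest from by
        simp [pvGroupRuns, hpc]]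
      rw [List.mem_cons, ih p 1 hrest]
      constructor
      · rintro (h' | ⟨h1, h2⟩ | ⟨h1, h2, h3⟩)
        · subst h'; exact Or.inl ⟨rfl, by rw [hcount0]; simp⟩
        · refine Or.inr ⟨by rw [h1]; exact fun hh => hpc hh, by simp [h1], ?_⟩
          rw [h2, h1, List.count_cons_self]; push_cast; ring
        · have hqc : q.1 ≠ cur := fun hh => hcurnot (hh ▸ h2)
          exact Or.inr ⟨hqc, by simp [h2], by simp [h3, List.count_cons, Ne.symm h1]⟩
      · rintro (⟨h1, h2⟩ | ⟨h1, h2, h3⟩)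
        · left; rw [hcount0] at h2; simp at h2
          exact Prod.ext_iff.mpr ⟨h1, h2⟩
        · right
          rcases List.mem_cons.mp h2 with h' | h'
          · exact Or.inl ⟨h', by rw [h3, h', List.count_cons_self]; push_cast; ring⟩
          · by_cases hqp : q.1 = p
            · exact Or.inl ⟨hqp, by rw [h3, hqp, List.count_cons_self]; push_cast; ring⟩
            · exact Or.inr ⟨hqp, h', by simp [h3, List.count_cons, Ne.symm hqp]⟩

theorem pv_mem_groupRuns_count (p : Int × Int) (rest : List (Int × Int))
    (h : (p :: rest).Pairwise pvLexLe) (q : (Int × Int) × Int) :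
    q ∈ pvGroupRuns p 1 rest ↔ (q.1 ∈ p :: rest ∧ q.2 = ((p :: rest).count q.1 : Int)) := by
  rw [pv_mem_groupRuns_iff rest p 1 h q]
  by_cases hqp : q.1 = p
  · simp only [hqp, List.count_cons_self, ne_eq, not_true_eq_false, false_and, or_false,
      List.mem_cons, true_or, true_and]
    push_cast
    constructor <;> intro h2 <;> omega
  · simp [hqp, List.count_cons, Ne.symm hqp]

theorem pv_sorted2_eq_sorted_toLex {α : Type} (xs : List α) (k1 k2 : α → Int) :
    PySem.List.sorted2 xs k1 k2 = PySem.List.sorted xs (fun a => toLex (k1 a, k2 a)) := by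
  unfold PySem.List.sorted2 PySem.List.sorted
  simp only [if_neg (by decide : ¬ (false = true))]
  congr 1
  funext acc x
  congr 1
  funext a b
  have : (toLex (k1 a, k2 a) < toLex (k1 b, k2 b)) ↔ (k1 a < k1 b ∨ (k1 a = k1 b ∧ k2 a < k2 b)) := Prod.Lex.lt_iff
  by_cases h1 : k1 a < k1 b <;> by_cases h2 : k1 b < k1 a <;> by_cases h3 : k2 a < k2 b <;>
    simp [h1, h2, h3, this] <;> omega

theorem pv_step_eq_modify (d : PySem.Dict (Int × Int) Int) (k : Int × Int) :
    (let d1 := if d.contains k = false then d.insert k 0 else d;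
     d1.insert k (d1.getD k 0 + 1)) = d.modify k 0 (· + 1) := by
  by_cases h : d.contains k = false
  · simp [h, PySem.Dict.modify, PySem.Dict.getD_insert_self,
      PySem.Dict.insert_insert_self, PySem.Dict.getD_of_not_contains (h := h)]
  · simp [h, PySem.Dict.modify]

theorem pv_dict_eq_counter (triples : List (Int × Int × Int)) :
    triples.foldl (fun d t =>
      match t with
      | (s, _, o) =>
        let d := if d.contains (s, o) = false then d.insert (s, o) 0 else d
        d.insert (s, o) (d.getD (s, o) 0 + 1)) (PySem.Dict.empty : PySem.Dict (Int × Int) Int)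
      = PySem.Dict.counter (triples.map (fun t => (t.1, t.2.2))) := by
  rw [PySem.Dict.counter_eq_foldl, List.foldl_map]
  apply PySem.List.foldl_congr_mem
  intro d t _
  exact pv_step_eq_modify d (t.1, t.2.2)

theorem pv_main (triples : List (Int × Int × Int)) :
    get_subj_obj_cofreqs triples = get_subj_obj_cofreqs_alt triples := by
  unfold get_subj_obj_cofreqs get_subj_obj_cofreqs_alt
  dsimp only
  rw [pv_dict_eq_counter triples]
  rw [PySem.Dict.items_counter]
  set rawPairs := triples.map (fun t => (t.1, t.2.2)) with hraw
  set sp := PySem.List.sorted2 rawPairs (fun p => p.1) (fun p => p.2) with hspdef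
  have hperm : sp.Perm rawPairs := PySem.List.sorted2_perm rawPairs _ _ false
  have hpw : sp.Pairwise pvLexLe := by
    rw [hspdef, pv_sorted2_eq_sorted_toLex]
    refine (PySem.List.sorted_pairwise rawPairs (fun a => toLex (a.1, a.2))).imp ?_
    intro a b hab
    have := Prod.Lex.le_iff.mp hab
    simpa [pvLexLe] using this
  cases hsl : sp with
  | nil =>
    have hre : rawPairs = [] := (hsl ▸ hperm).symm.eq_nil
    simp [hre, PySem.Set.ofList]
    rfl
  | cons p rest =>
    have hpw' : (p :: rest).Pairwise pvLexLe := hsl ▸ hpw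
    have hperm' : (p :: rest).Perm rawPairs := hsl ▸ hperm
    have hfold := pv_foldl_altStep rest [] p 1
    simp only [List.foldl_cons, pvAltStep, if_neg (by simp : ¬ (some p = none))]
    rw [hfold, List.nil_append]
    congr 1
    rw [pv_sorted2_eq_sorted_toLex]
    apply PySem.List.sorted_eq_of_perm_of_pairwise_lt
    · -- permutation
      have hgrnd : (pvGroupRuns p 1 rest).Nodup := by
        refine List.Pairwise.imp ?_ (pv_groupRuns_pairwise rest p 1 hpw')
        intro a b hab heq
        exact pv_lexLt_irrefl a.1 (heq ▸ hab)
      have hitnd : ((PySem.Set.ofList rawPairs).map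
          (fun k => (k, (rawPairs.count k : Int)))).Nodup := by
        refine List.Nodup.map ?_ (PySem.Set.nodup_ofList rawPairs)
        intro a b hab
        exact congrArg Prod.fst hab
      refine (List.perm_ext_iff_of_nodup hgrnd hitnd).mpr ?_
      intro q
      rw [pv_mem_groupRuns_count p rest hpw' q, List.mem_map]
      constructor
      · rintro ⟨hmem, hcnt⟩
        refine ⟨q.1, (PySem.Set.mem_ofList _ _).mpr (hperm'.subset hmem), ?_⟩
        rw [← hperm'.count_eq q.1, ← hcnt]
      · rintro ⟨k, hk, hkq⟩
        have hk1 : q.1 = k := (congrArg Prod.fst hkq).symm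
        subst hk1
        refine ⟨hperm'.mem_iff.mpr ((PySem.Set.mem_ofList _ _).mp hk), ?_⟩
        rw [hperm'.count_eq q.1]
        exact (congrArg Prod.snd hkq).symm
    · -- strictly increasing keys
      refine List.Pairwise.imp ?_ (pv_groupRuns_pairwise rest p 1 hpw')
      intro a b hab
      refine Prod.Lex.lt_iff.mpr ?_
      simpa [pvLexLt] using hab

-- ===== VERDICT (by name: the statement is the Claim_ definition above) =====
theorem get_subj_obj_cofreqs_spec : Claim_equal_get_subj_obj_cofreqs := by
  intro triples _
  unfold Spec_get_subj_obj_cofreqs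
  exact pv_main triples
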